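-- pv_equiv track=rewrite | github.com/AlbertMoren/-Protocolo-conservador-2V2PL | entrada_dados.py | lista_operacoes
-- ===== SOURCE A (Python) =====
-- def lista_operacoes(schedule_str):
--     operacoes_str = schedule_str.replace(" ", "").split(",")
--
--     operacoes_formatadas = []
--     for operacao_gran in operacoes_str:
--         if '-' in operacao_gran:
--             operacao, granulosidade = operacao_gran.split("-")
--         else:
--             operacao = operacao_gran
--             granulosidade = None
--
--         operacoes_formatadas.append([operacao, granulosidade])
--
--     transacoes = separa_transacoes(operacoes_formatadas)
--     return operacoes_formatadas, transacoes
--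
-- def separa_transacoes(operacoes):
--     transacoes_dict = {}
--
--     for operacao, _ in operacoes:
--         transacao_id = operacao[1]
--         if transacao_id not in transacoes_dict:
--             transacoes_dict[transacao_id] = []
--         transacoes_dict[transacao_id].append(operacao)
--
--     return transacoes_dict
-- ===== SOURCE B (Python) =====
-- def lista_operacoes(schedule_str):
--     toks = schedule_str.replace(" ", "").split(",")
--     ops = [tok[:tok.find("-")] if "-" in tok else tok for tok in toks]
--     grans = [tok[tok.find("-") + 1:] if "-" in tok else None for tok in toks]
--     operacoes_formatadas = [[op, gran] for op, gran in zip(ops, grans)]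
--     chaves = []
--     for op in ops:
--         if op[1] not in chaves:
--             chaves.append(op[1])
--     transacoes = {tid: [op for op in ops if op[1] == tid] for tid in chaves}
--     return operacoes_formatadas, transacoes
-- ===== Notes on version B (the rewrite author's own statement) =====
-- stated objective: alternative
-- what changed: B parses columnar-style into two parallel lists (operations, granularities) zipped into pairs, then builds the transactions dict by a dict comprehension that, for each distinct transaction id in first-occurrence order, re-filters the whole operation list — replacing A's per-token split pass plus single-pass dict-append grouping.
import Mathlib
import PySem

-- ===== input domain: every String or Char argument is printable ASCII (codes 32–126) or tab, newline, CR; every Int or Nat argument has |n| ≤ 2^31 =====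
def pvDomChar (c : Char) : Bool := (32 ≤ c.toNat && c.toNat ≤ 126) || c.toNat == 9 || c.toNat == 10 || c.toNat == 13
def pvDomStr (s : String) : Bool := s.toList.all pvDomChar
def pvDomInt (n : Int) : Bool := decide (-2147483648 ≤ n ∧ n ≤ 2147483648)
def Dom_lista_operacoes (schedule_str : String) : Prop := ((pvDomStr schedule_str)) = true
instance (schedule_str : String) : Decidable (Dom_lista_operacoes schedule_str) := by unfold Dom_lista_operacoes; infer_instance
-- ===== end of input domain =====

-- B parses into two parallel lists (operations/granularities) zipped into pairs and builds the
-- transactions dict by per-key filtering over the distinct ids in first-occurrence order, instead of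
-- A's per-token split pass plus single-pass dict-append grouping (objective: alternative).

-- shared primitive: Python's `operacao[1]` as a 1-character string (none = IndexError)
def pvKey (operacao : String) : Option String :=
  (PySem.Str.pyGet? operacao 1).map (fun c => String.ofList [c])

-- ===== PORT A =====
-- '-' in tok / tok.split("-"): Str-level split is PySem.Chars.splitOn on .toList (sep ≠ ""), exact.
def pvSplitA (operacao_gran : String) : List (Option String) :=
  if PySem.Str.isIn "-" operacao_gran then
    match (PySem.Chars.splitOn operacao_gran.toList ['-']).map String.ofList with
    | [operacao, granulosidade] => [some operacao, some granulosidade]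
    | _ => []  -- Python raises ValueError on the 2-tuple unpacking: excluded by Pre_
  else [some operacao_gran, none]

-- one iteration of separa_transacoes' loop
def pvGroupStep (d : PySem.Dict String (List String)) (par : List (Option String)) :
    PySem.Dict String (List String) :=
  match par with
  | some operacao :: _ =>
    match pvKey operacao with  -- transacao_id = operacao[1]
    | some tid =>
        let d1 := if d.contains tid then d else d.insert tid []
        d1.modify tid [] (fun l => l ++ [operacao])
    | none => d  -- Python raises IndexError here: excluded by Pre_
  | _ => d

def separa_transacoes (operacoes : List (List (Option String))) : PySem.Dict String (List String) :=
  operacoes.foldl pvGroupStep PySem.Dict.empty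

def lista_operacoes (schedule_str : String) :
    List (List (Option String)) × (List (String × List String)) :=
  let operacoes_str :=
    (PySem.Chars.splitOn (PySem.Str.replace schedule_str " " "").toList [',']).map String.ofList
  let operacoes_formatadas := operacoes_str.foldl (fun acc t => acc ++ [pvSplitA t]) []
  (operacoes_formatadas, (separa_transacoes operacoes_formatadas).items)

-- ===== PORT B =====
-- tok[:tok.find("-")] if "-" in tok else tok
def pvOp (tok : String) : String :=
  if PySem.Str.isIn "-" tok then PySem.Str.slice tok none (some (PySem.Str.find tok "-")) else tok
-- tok[tok.find("-") + 1:] if "-" in tok else None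
def pvGran (tok : String) : Option String :=
  if PySem.Str.isIn "-" tok then some (PySem.Str.slice tok (some (PySem.Str.find tok "-" + 1)) none)
  else none

def lista_operacoes_alt (schedule_str : String) :
    List (List (Option String)) × (List (String × List String)) :=
  let toks :=
    (PySem.Chars.splitOn (PySem.Str.replace schedule_str " " "").toList [',']).map String.ofList
  let ops := toks.map pvOp
  let grans := toks.map pvGran
  let operacoes_formatadas := (ops.zip grans).map (fun og => [some og.1, og.2])
  -- chaves: distinct op[1] in first-occurrence order (list membership test = PySem.Set.add)
  let chaves := ops.foldl (fun ks op =>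
    match pvKey op with
    | some tid => PySem.Set.add ks tid
    | none => ks) ([] : List String)  -- Python raises IndexError on a short op: excluded by Pre_
  -- {tid: [op for op in ops if op[1] == tid] for tid in chaves}
  let transacoes := chaves.foldl (fun d tid =>
    d.insert tid (ops.filter (fun op => pvKey op == some tid))) PySem.Dict.empty
  (operacoes_formatadas, transacoes.items)

-- ===== PRECONDITION & SPEC =====
-- Pre_ excludes exactly the inputs on which A raises: a token (after space removal and ','-split) with
-- two or more '-' (ValueError on unpacking) or whose operation part has fewer than 2 characters
-- (IndexError on operacao[1]).
def Pre_lista_operacoes (schedule_str : String) : Prop :=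
  ∀ tok ∈ (PySem.Chars.splitOn (PySem.Str.replace schedule_str " " "").toList [',']).map String.ofList,
    (PySem.Str.count tok "-" = 0 ∧ 2 ≤ PySem.Str.len tok) ∨
    (PySem.Str.count tok "-" = 1 ∧ 2 ≤ PySem.Str.find tok "-")
instance (schedule_str : String) : Decidable (Pre_lista_operacoes schedule_str) := by
  unfold Pre_lista_operacoes; infer_instance
def pvWitness_lista_operacoes : String := "r1-x, w2-y, c1"

def Spec_lista_operacoes (schedule_str : String)
    (out : List (List (Option String)) × (List (String × List String))) : Prop :=
  out = lista_operacoes_alt schedule_str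
instance (schedule_str : String) (out : List (List (Option String)) × (List (String × List String))) :
    Decidable (Spec_lista_operacoes schedule_str out) := by unfold Spec_lista_operacoes; infer_instance

-- ===== CLAIM (what is proved, stated in full; the proofs are below) =====
def Claim_equal_lista_operacoes : Prop := ∀ (schedule_str : String), Dom_lista_operacoes schedule_str → Pre_lista_operacoes schedule_str → Spec_lista_operacoes schedule_str (lista_operacoes schedule_str)

-- ===== LEMMAS AND PROOFS =====

theorem splitOn_go_no_dash (l : List Char) : ∀ (fuel : Nat) (cur : List Char) (acc : List (List Char)),
    '-' ∉ l → l.length ≤ fuel →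
    PySem.Chars.splitOn.go ['-'] fuel l cur acc = acc.reverse ++ [cur.reverse ++ l] := by
  induction l with
  | nil => intro fuel cur acc _ _; cases fuel <;> simp [PySem.Chars.splitOn.go]
  | cons c rest ih =>
    intro fuel cur acc hmem hlen
    cases fuel with
    | zero => exact absurd hlen (by simp)
    | succ f =>
      have hc : ('-' == c) = false :=
        beq_eq_false_iff_ne.mpr (fun h => hmem (h ▸ List.mem_cons_self))
      simp only [PySem.Chars.splitOn.go, List.isPrefixOf, hc, Bool.false_and]
      rw [ih f (c :: cur) acc (fun h => hmem (List.mem_cons_of_mem _ h)) (by simpa using Nat.le_of_succ_le_succ hlen)]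
      simp

theorem splitOn_decomp (a b : List Char) (ha : '-' ∉ a) (hb : '-' ∉ b) :
    PySem.Chars.splitOn (a ++ '-' :: b) ['-'] = [a, b] := by
  have go2 : ∀ (l : List Char) (fuel : Nat) (cur : List Char) (acc : List (List Char)),
      '-' ∉ l → l.length + b.length + 1 ≤ fuel →
      PySem.Chars.splitOn.go ['-'] fuel (l ++ '-' :: b) cur acc
        = acc.reverse ++ [cur.reverse ++ l, b] := by
    intro l
    induction l with
    | nil =>
      intro fuel cur acc _ hlen
      cases fuel with
      | zero => exact absurd hlen (by simp)
      | succ f =>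
        simp only [List.nil_append, PySem.Chars.splitOn.go, List.isPrefixOf, beq_self_eq_true,
          Bool.true_and, if_true, List.length_cons, List.length_nil, List.drop_succ_cons,
          List.drop_zero]
        rw [splitOn_go_no_dash b f [] (cur.reverse :: acc) hb (by omega)]
        simp
    | cons c rest ih =>
      intro fuel cur acc hmem hlen
      cases fuel with
      | zero => exact absurd hlen (by simp)
      | succ f =>
        have hc : ('-' == c) = false :=
          beq_eq_false_iff_ne.mpr (fun h => hmem (h ▸ List.mem_cons_self))
        simp only [List.cons_append, PySem.Chars.splitOn.go, List.isPrefixOf, hc, Bool.false_and]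
        rw [ih f (c :: cur) acc (fun h => hmem (List.mem_cons_of_mem _ h))
          (by simp only [List.length_cons] at hlen; omega)]
        simp
  unfold PySem.Chars.splitOn
  rw [go2 a _ [] [] ha (by simp)]
  simp

theorem count_go_eq (l : List Char) : ∀ (fuel acc : Nat), l.length ≤ fuel →
    PySem.Chars.count.go ['-'] fuel l acc = acc + l.count '-' := by
  induction l with
  | nil => intro fuel acc _; cases fuel <;> simp [PySem.Chars.count.go]
  | cons c rest ih =>
    intro fuel acc hlen
    cases fuel with
    | zero => exact absurd hlen (by simp)
    | succ f =>
      have hlen' : rest.length ≤ f := by simp only [List.length_cons] at hlen; omega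
      by_cases h : '-' = c
      · subst h
        simp only [PySem.Chars.count.go, List.isPrefixOf, beq_self_eq_true, Bool.true_and, if_true,
          List.length_cons, List.length_nil, List.drop_succ_cons, List.drop_zero]
        rw [ih f (acc + 1) hlen']
        simp only [List.count_cons_self]
        omega
      · have hc : ('-' == c) = false := beq_eq_false_iff_ne.mpr h
        simp only [PySem.Chars.count.go, List.isPrefixOf, hc, Bool.false_and]
        rw [ih f acc hlen']
        simp [List.count_cons, beq_eq_false_iff_ne.mpr (fun hh => h hh.symm)]

theorem count_eq_list_count (tok : String) : PySem.Str.count tok "-" = tok.toList.count '-' := by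
  show PySem.Chars.count tok.toList ['-'] = _
  unfold PySem.Chars.count
  simp only [List.isEmpty_cons, if_false, Bool.false_eq_true]
  exact (count_go_eq tok.toList tok.toList.length 0 le_rfl).trans (by omega)

theorem find_go_decomp (b : List Char) (a : List Char) : ∀ (k : Nat), '-' ∉ a →
    PySem.Chars.find.go ['-'] (a ++ '-' :: b) k = (k : Int) + a.length := by
  induction a with
  | nil =>
    intro k _
    simp [PySem.Chars.find.go, List.isPrefixOf]
  | cons c rest ih =>
    intro k hmem
    have hc : ('-' == c) = false :=
      beq_eq_false_iff_ne.mpr (fun h => hmem (h ▸ List.mem_cons_self))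
    simp only [List.cons_append, PySem.Chars.find.go, List.isPrefixOf, hc, Bool.false_and]
    rw [ih (k + 1) (fun h => hmem (List.mem_cons_of_mem _ h))]
    push_cast
    simp [List.length_cons]
    ring

theorem exists_first_dash (l : List Char) (h : '-' ∈ l) :
    ∃ a b, l = a ++ '-' :: b ∧ '-' ∉ a := by
  induction l with
  | nil => cases h
  | cons c rest ih =>
    by_cases hc : '-' = c
    · exact ⟨[], rest, by simp [← hc], by simp⟩
    · obtain ⟨a, b, rfl, ha⟩ := ih ((List.mem_cons.mp h).resolve_left hc)
      exact ⟨c :: a, b, rfl, by simp [List.mem_cons, ha, hc]⟩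

-- A's per-token split equals B's columnar op/gran pair on tokens with at most one dash.
theorem splitA_eq (tok : String)
    (h : PySem.Str.count tok "-" = 0 ∨ PySem.Str.count tok "-" = 1) :
    pvSplitA tok = [some (pvOp tok), pvGran tok] := by
  rcases h with h | h
  · have h0 : tok.toList.count '-' = 0 := by rw [← count_eq_list_count]; exact h
    have hmem : '-' ∉ tok.toList := List.count_eq_zero.mp h0
    have hisin : PySem.Chars.isIn ['-'] tok.toList = false :=
      (PySem.Chars.isIn_eq_false_iff _ _).mpr
        (fun hinf => hmem ((List.singleton_infix_iff _ _).mp hinf))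
    unfold pvSplitA pvOp pvGran
    simp [PySem.Str.isIn, show "-".toList = ['-'] from rfl, hisin]
  · have h1 : tok.toList.count '-' = 1 := by rw [← count_eq_list_count]; exact h
    have hmem : '-' ∈ tok.toList :=
      List.count_pos_iff.mp (by omega : 0 < tok.toList.count '-')
    obtain ⟨a, b, hsplit, ha⟩ := exists_first_dash _ hmem
    have hb : '-' ∉ b := by
      apply List.count_eq_zero.mp
      rw [hsplit] at h1
      simp only [List.count_append, List.count_cons, List.count_eq_zero.mpr ha,
        beq_self_eq_true, if_true] at h1
      omega
    have hfind : PySem.Chars.find tok.toList ['-'] = (a.length : Int) := by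
      unfold PySem.Chars.find
      rw [hsplit, find_go_decomp b a 0 ha]
      simp
    have hisin : PySem.Chars.isIn ['-'] tok.toList = true :=
      (PySem.Chars.isIn_iff_infix _ _).mpr ((List.singleton_infix_iff _ _).mpr hmem)
    have hsplitOn : PySem.Chars.splitOn tok.toList ['-'] = [a, b] := by
      rw [hsplit]; exact splitOn_decomp a b ha hb
    have hop : PySem.Str.slice tok none (some ((a.length : Int))) = String.ofList a := by
      show String.ofList (PySem.Chars.slice tok.toList none (some (a.length : Int))) = _
      rw [PySem.Chars.slice_eq_listSlice, PySem.List.slice_to _ (by positivity)]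
      rw [hsplit]
      simp
    have hgran : PySem.Str.slice tok (some ((a.length : Int) + 1)) none = String.ofList b := by
      show String.ofList (PySem.Chars.slice tok.toList (some ((a.length : Int) + 1)) none) = _
      rw [PySem.Chars.slice_eq_listSlice, PySem.List.slice_from _ (by positivity)]
      rw [hsplit, List.append_cons]
      have hn : (((a.length : Int)) + 1).toNat = (a ++ ['-']).length := by simp
      rw [hn, List.drop_left]
    unfold pvSplitA pvOp pvGran
    simp only [PySem.Str.isIn, PySem.Str.find, show "-".toList = ['-'] from rfl, hisin,
      if_true, hsplitOn, List.map_cons, List.map_nil, hfind, hop, hgran]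

-- A's conditional insert-then-modify is a plain modify.
theorem ins_modify (d : PySem.Dict String (List String)) (t : String) (f : List String → List String) :
    (if d.contains t then d else d.insert t []).modify t [] f = d.modify t [] f := by
  by_cases h : d.contains t
  · simp [h]
  · simp only [h, Bool.false_eq_true, if_false]
    show (d.insert t []).insert t (f ((d.insert t []).getD t [])) = d.insert t (f (d.getD t []))
    rw [PySem.Dict.getD_insert_self, PySem.Dict.insert_insert_self,
      PySem.Dict.getD_of_not_contains d [] (by simpa using h)]

-- A's grouping fold, expressed over the operation strings only
def pvGA (ops : List String) (d : PySem.Dict String (List String)) : PySem.Dict String (List String) :=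
  ops.foldl (fun d op =>
    match pvKey op with
    | some tid => d.modify tid [] (fun l => l ++ [op])
    | none => d) d

def pvPairs (ops : List String) : List (String × String) :=
  ops.filterMap (fun op => (pvKey op).map (fun t => (t, op)))

theorem groupStep_eq (d : PySem.Dict String (List String)) (op : String) (g : Option String) :
    pvGroupStep d [some op, g] =
      match pvKey op with
      | some tid => d.modify tid [] (fun l => l ++ [op])
      | none => d := by
  unfold pvGroupStep
  cases h : pvKey op with
  | none => simp [h]
  | some tid => simp only [h]; exact ins_modify d tid _

theorem gA_eq_pairs (ops : List String) : ∀ d, pvGA ops d =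
    (pvPairs ops).foldl (fun d p => d.modify p.1 [] (fun l => l ++ [p.2])) d := by
  unfold pvGA pvPairs
  induction ops with
  | nil => intro d; simp
  | cons op rest ih =>
    intro d
    cases h : pvKey op with
    | none => simp only [List.foldl_cons, List.filterMap_cons, h]; exact ih d
    | some tid =>
      simp only [List.foldl_cons, List.filterMap_cons, h, Option.map_some]
      exact ih _

theorem pairs_fst (ops : List String) : (pvPairs ops).map Prod.fst = ops.filterMap pvKey := by
  induction ops with
  | nil => simp [pvPairs]
  | cons op rest ih =>
    cases h : pvKey op <;> simp [pvPairs, h] <;> simpa [pvPairs] using ih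

theorem pairs_filter (ops : List String) (c : String) :
    ((pvPairs ops).filter (fun p => p.1 == c)).map (fun x => x.2)
      = ops.filter (fun op => pvKey op == some c) := by
  induction ops with
  | nil => simp [pvPairs]
  | cons op rest ih =>
    cases h : pvKey op with
    | none => simpa [pvPairs, List.filterMap_cons, h, List.filter_cons] using ih
    | some t =>
      by_cases ht : t = c
      · subst ht
        simpa [pvPairs, List.filterMap_cons, h, List.filter_cons] using ih
      · have : (t == c) = false := beq_eq_false_iff_ne.mpr ht
        simpa [pvPairs, List.filterMap_cons, h, List.filter_cons, this] using ih

theorem chaves_eq (ops : List String) : ∀ ks : List String,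
    ops.foldl (fun ks op =>
      match pvKey op with
      | some tid => PySem.Set.add ks tid
      | none => ks) ks = PySem.Set.update ks (ops.filterMap pvKey) := by
  induction ops with
  | nil => intro ks; simp [PySem.Set.update_nil]
  | cons op rest ih =>
    intro ks
    cases h : pvKey op with
    | none => simp only [List.foldl_cons, List.filterMap_cons, h]; exact ih ks
    | some t =>
      simp only [List.foldl_cons, List.filterMap_cons, h, PySem.Set.update_cons]
      exact ih (PySem.Set.add ks t)

-- the two grouping strategies produce the same items list
theorem group_items (ops : List String) :
    (pvGA ops PySem.Dict.empty).items
      = ((ops.foldl (fun ks op =>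
            match pvKey op with
            | some tid => PySem.Set.add ks tid
            | none => ks) ([] : List String)).foldl (fun d tid =>
          d.insert tid (ops.filter (fun op => pvKey op == some tid))) PySem.Dict.empty).items := by
  have hch : (ops.foldl (fun ks op =>
      match pvKey op with
      | some tid => PySem.Set.add ks tid
      | none => ks) ([] : List String)) = PySem.Set.ofList (ops.filterMap pvKey) := by
    rw [chaves_eq ops [], PySem.Set.update_nil_left]
  have hkeys : (pvGA ops PySem.Dict.empty).keys = PySem.Set.ofList (ops.filterMap pvKey) := by
    rw [gA_eq_pairs ops PySem.Dict.empty]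
    have := PySem.Dict.keys_foldl_modify_key (pvPairs ops) Prod.fst ([] : List String)
      (fun _ p => fun l => l ++ [p.2]) PySem.Dict.empty
    rw [this, pairs_fst]
    simp [PySem.Set.update_nil_left, PySem.Dict.keys_empty]
  have hnodup : (pvGA ops PySem.Dict.empty).keys.Nodup := by
    rw [hkeys]; exact PySem.Set.nodup_ofList _
  have hgetD : ∀ c, (pvGA ops PySem.Dict.empty).getD c [] =
      ops.filter (fun op => pvKey op == some c) := by
    intro c
    rw [gA_eq_pairs ops PySem.Dict.empty, PySem.Dict.getD_foldl_modify_append, pairs_filter]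
    simp [PySem.Dict.getD_empty]
  rw [hch]
  rw [PySem.Dict.items_eq_map_keys _ hnodup ([] : List String), hkeys]
  rw [PySem.Dict.items_foldl_insert_fresh (PySem.Set.ofList (ops.filterMap pvKey))
    (fun a => a) (fun tid => ops.filter (fun op => pvKey op == some tid)) PySem.Dict.empty
    (fun a _ => PySem.Dict.contains_empty a) (by simp)]
  simp only [show (PySem.Dict.empty : PySem.Dict String (List String)).items = [] from rfl,
    List.nil_append]
  exact List.map_congr_left (fun k _ => by rw [hgetD k])

-- both ports as a function of the token list
theorem main_toks (toks : List String)
    (hcnt : ∀ tok ∈ toks, PySem.Str.count tok "-" = 0 ∨ PySem.Str.count tok "-" = 1) :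
    (toks.foldl (fun acc t => acc ++ [pvSplitA t]) [],
      ((toks.foldl (fun acc t => acc ++ [pvSplitA t]) []).foldl pvGroupStep PySem.Dict.empty).items)
    = (((toks.map pvOp).zip (toks.map pvGran)).map (fun og => [some og.1, og.2]),
       (((toks.map pvOp).foldl (fun ks op =>
            match pvKey op with
            | some tid => PySem.Set.add ks tid
            | none => ks) ([] : List String)).foldl (fun d tid =>
          d.insert tid ((toks.map pvOp).filter (fun op => pvKey op == some tid)))
          PySem.Dict.empty).items) := by
  have hfmt : toks.foldl (fun acc t => acc ++ [pvSplitA t]) [] =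
      ((toks.map pvOp).zip (toks.map pvGran)).map (fun og => [some og.1, og.2]) := by
    rw [PySem.List.foldl_append_singleton_eq_map, List.nil_append, List.zip_map', List.map_map]
    exact List.map_congr_left (fun t ht => splitA_eq t (hcnt t ht))
  have hA : (((toks.map pvOp).zip (toks.map pvGran)).map (fun og => [some og.1, og.2])).foldl
      pvGroupStep PySem.Dict.empty = pvGA (toks.map pvOp) PySem.Dict.empty := by
    rw [List.zip_map', List.map_map, List.foldl_map]
    unfold pvGA
    rw [List.foldl_map]
    exact List.foldl_ext _ _ _ (fun d t _ => groupStep_eq d (pvOp t) (pvGran t))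
  rw [hfmt, hA, group_items]

-- ===== VERDICT (by name: the statement is the Claim_ definition above) =====
theorem lista_operacoes_spec : Claim_equal_lista_operacoes := by
  intro s _ hPre
  unfold Spec_lista_operacoes lista_operacoes lista_operacoes_alt separa_transacoes
  exact main_toks _ (fun tok htok =>
    (hPre tok htok).elim (fun h => Or.inl h.1) (fun h => Or.inr h.1))
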